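-- pv_equiv track=rewrite | github.com/damjanssb/Python | Learning/5.4 reči u rečenici.py | ukloni_interpunkciju
-- ===== SOURCE A (Python) =====
-- def ukloni_interpunkciju(reč):
--     '''Čisti unetu reč od interpunkciskih znakova sa početka i kraja reči.'''
--     interpunkcija=['.', ',', '!', '?', ':', ';', '\'', '"']
--     n=len(reč)
--     levo=0
--     while levo<n and reč[levo] in interpunkcija:
--         levo+=1
--     desno=n-1
--     while desno>-1 and reč[desno] in interpunkcija:
--         desno-=1
--     return reč[levo:desno+1]
-- ===== SOURCE B (Python) =====
-- def ukloni_interpunkciju(reč):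
--     '''Čisti unetu reč od interpunkciskih znakova sa početka i kraja reči.'''
--     interpunkcija = ['.', ',', '!', '?', ':', ';', '\'', '"']
--     keep = [i for i, c in enumerate(reč) if c not in interpunkcija]
--     if not keep:
--         return ''
--     return reč[keep[0]:keep[-1] + 1]
-- ===== Notes on version B (the rewrite author's own statement) =====
-- stated objective: alternative
-- what changed: Instead of A's two index walks inward from each end, B makes one full pass collecting the positions of all non-punctuation characters and slices from the first to the last such position (empty string if there are none).
import Mathlib
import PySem

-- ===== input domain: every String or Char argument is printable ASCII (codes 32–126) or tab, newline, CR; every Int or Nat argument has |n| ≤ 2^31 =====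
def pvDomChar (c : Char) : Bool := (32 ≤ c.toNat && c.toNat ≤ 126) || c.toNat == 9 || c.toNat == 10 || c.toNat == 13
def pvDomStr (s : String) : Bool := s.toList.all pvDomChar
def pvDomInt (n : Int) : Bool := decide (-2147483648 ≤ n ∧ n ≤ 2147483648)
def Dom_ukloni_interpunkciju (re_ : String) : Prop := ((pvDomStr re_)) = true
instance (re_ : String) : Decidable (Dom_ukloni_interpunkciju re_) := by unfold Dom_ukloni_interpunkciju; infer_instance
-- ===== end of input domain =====

-- B replaces A's two inward index walks by one full pass that collects the positions of all
-- non-punctuation characters and slices from the first to the last such position (alternative, same cost).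

-- ===== PORT A =====
-- interpunkcija=['.', ',', '!', '?', ':', ';', '\'', '"']
def pvPunct : List Char := ['.', ',', '!', '?', ':', ';', '\'', '"']

-- while levo<n and reč[levo] in interpunkcija: levo+=1
def pvLeftLoop (s : List Char) (levo : Nat) : Nat :=
  if h : levo < s.length ∧ pvPunct.contains (PySem.List.pyGetD s (levo : Int) ' ') = true then
    pvLeftLoop s (levo + 1)
  else levo
termination_by s.length - levo
decreasing_by omega

-- while desno>-1 and reč[desno] in interpunkcija: desno-=1
def pvRightLoop (s : List Char) (desno : Int) : Int :=
  if h : -1 < desno ∧ pvPunct.contains (PySem.List.pyGetD s desno ' ') = true then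
    pvRightLoop s (desno - 1)
  else desno
termination_by (desno + 1).toNat
decreasing_by omega

def ukloni_interpunkciju (re_ : String) : String :=
  let s := re_.toList
  let n := s.length
  let levo := pvLeftLoop s 0
  let desno := pvRightLoop s ((n : Int) - 1)
  String.ofList (PySem.List.slice s (some (levo : Int)) (some (desno + 1)))

-- ===== PORT B =====
-- interpunkcija = ['.', ',', '!', '?', ':', ';', '\'', '"']
def pvPunctB : List Char := ['.', ',', '!', '?', ':', ';', '\'', '"']

-- keep = [i for i, c in enumerate(reč) if c not in interpunkcija]
def pvKeep (s : List Char) (k : Int) : List Int :=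
  ((PySem.List.enumerate s k).filter (fun ic => !(pvPunctB.contains ic.2))).map Prod.fst

-- if not keep: return ''      else: return reč[keep[0]:keep[-1] + 1]
def ukloni_interpunkciju_alt (re_ : String) : String :=
  let s := re_.toList
  match h : pvKeep s 0 with
  | [] => ""
  | i :: rest =>
      String.ofList (PySem.List.slice s (some i)
        (some ((i :: rest).getLast (by simp) + 1)))

-- ===== PRECONDITION & SPEC =====
def Spec_ukloni_interpunkciju (re_ : String) (out : String) : Prop := out = ukloni_interpunkciju_alt re_
instance (re_ : String) (out : String) : Decidable (Spec_ukloni_interpunkciju re_ out) := by unfold Spec_ukloni_interpunkciju; infer_instance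

-- ===== CLAIM (what is proved, stated in full; the proofs are below) =====
def Claim_equal_ukloni_interpunkciju : Prop := ∀ (re_ : String), Dom_ukloni_interpunkciju re_ → Spec_ukloni_interpunkciju re_ (ukloni_interpunkciju re_)

-- ===== LEMMAS AND PROOFS =====

lemma pvPunctB_eq : pvPunctB = pvPunct := rfl

-- A's left loop stops at the length of the punctuation prefix
lemma pvLeftLoop_eq (s : List Char) (levo : Nat) :
    levo ≤ s.length → pvLeftLoop s levo = levo + ((s.drop levo).takeWhile pvPunct.contains).length := by
  induction levo using pvLeftLoop.induct (s := s) with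
  | case1 levo hc ih =>
    intro _
    obtain ⟨hlt, hp⟩ := hc
    rw [pvLeftLoop, dif_pos ⟨hlt, hp⟩, ih (by omega)]
    rw [PySem.List.pyGetD_natCast, List.getD_eq_getElem s ' ' hlt] at hp
    rw [List.drop_eq_getElem_cons hlt, List.takeWhile_cons, if_pos hp, List.length_cons]
    omega
  | case2 levo hc =>
    intro _
    rw [pvLeftLoop, dif_neg hc]
    rcases Nat.lt_or_ge levo s.length with hlt | hge
    · have hp : ¬ pvPunct.contains s[levo] = true := by
        intro hpp
        exact hc ⟨hlt, by
          rw [PySem.List.pyGetD_natCast, List.getD_eq_getElem s ' ' hlt]; exact hpp⟩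
      rw [List.drop_eq_getElem_cons hlt, List.takeWhile_cons, if_neg hp]
      simp
    · simp [List.drop_eq_nil_of_le hge]

-- A's right loop stops one before the length of the prefix that survives rstrip
lemma pvRightLoop_eq (s : List Char) (j : Nat) (h : j ≤ s.length) :
    pvRightLoop s ((j : Int) - 1) = (((s.take j).rdropWhile pvPunct.contains).length : Int) - 1 := by
  induction j with
  | zero =>
    rw [pvRightLoop, dif_neg (by simp)]
    simp [List.rdropWhile]
  | succ j ih =>
    have hj : j < s.length := by omega
    have hsucc : s.take (j + 1) = s.take j ++ [(s[j]'hj)] := by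
      rw [List.take_add_one]; simp [List.getElem?_eq_getElem hj]
    have hc1 : ((j + 1 : Nat) : Int) - 1 = (j : Int) := by push_cast; ring
    rw [hc1]
    have hget : PySem.List.pyGetD s ((j : Nat) : Int) ' ' = (s[j]'hj) := by
      rw [PySem.List.pyGetD_natCast, List.getD_eq_getElem s ' ' hj]
    by_cases hp : pvPunct.contains (s[j]'hj) = true
    · rw [pvRightLoop, dif_pos ⟨by omega, by rw [hget]; exact hp⟩]
      rw [ih (by omega), hsucc, List.rdropWhile_concat_pos pvPunct.contains (s.take j) ((s[j]'hj)) hp]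
    · have hcond : ¬ (-1 < ((j : Nat) : Int) ∧ pvPunct.contains (PySem.List.pyGetD s ((j : Nat) : Int) ' ') = true) := by
        rintro ⟨-, hcc⟩
        rw [hget] at hcc
        exact hp hcc
      rw [pvRightLoop, dif_neg hcond]
      have hres : List.rdropWhile pvPunct.contains (s.take (j + 1)) = s.take j ++ [(s[j]'hj)] := by
        rw [hsucc]
        exact List.rdropWhile_concat_neg pvPunct.contains (s.take j) ((s[j]'hj)) hp
      rw [hres]
      have hl : (s.take j ++ [(s[j]'hj)]).length = j + 1 := by
        rw [List.length_append, List.length_take]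
        simp
        omega
      rw [hl]
      push_cast
      ring

-- structural unfolding of B's index list
lemma pvKeep_nil (k : Int) : pvKeep [] k = [] := rfl

lemma pvKeep_cons (c : Char) (t : List Char) (k : Int) :
    pvKeep (c :: t) k =
      if c ∈ pvPunctB then pvKeep t (k + 1) else k :: pvKeep t (k + 1) := by
  by_cases hm : c ∈ pvPunctB <;>
    simp [pvKeep, PySem.List.enumerate_cons, hm]

lemma pvKeep_eq_nil_iff (s : List Char) (k : Int) :
    pvKeep s k = [] ↔ ∀ x ∈ s, x ∈ pvPunctB := by
  induction s generalizing k with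
  | nil => simp [pvKeep_nil]
  | cons c t ih =>
    rw [pvKeep_cons]
    by_cases hc : c ∈ pvPunctB
    · simpa [hc] using ih (k + 1)
    · simp [hc]

-- the first kept index is the length of the punctuation prefix
lemma pvKeep_headI (s : List Char) (k : Int) (h : pvKeep s k ≠ []) :
    (pvKeep s k).headI = k + ((s.takeWhile pvPunctB.contains).length : Int) := by
  induction s generalizing k with
  | nil => exact absurd (pvKeep_nil k) h
  | cons c t ih =>
    by_cases hc : c ∈ pvPunctB
    · have hc' : pvPunctB.contains c = true := by simpa using hc
      have hne : pvKeep t (k + 1) ≠ [] := by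
        intro hnil; exact h (by rw [pvKeep_cons, if_pos hc, hnil])
      rw [pvKeep_cons, if_pos hc, ih (k + 1) hne, List.takeWhile_cons, if_pos hc',
        List.length_cons]
      push_cast; ring
    · have hc' : ¬ pvPunctB.contains c = true := by simpa using hc
      rw [pvKeep_cons, if_neg hc, List.headI_cons, List.takeWhile_cons, if_neg hc']
      simp

-- rstrip facts needed for the last kept index
lemma pv_rd_cons_of_ne_nil (p : Char → Bool) (c : Char) (t : List Char)
    (h : t.rdropWhile p ≠ []) : (c :: t).rdropWhile p = c :: t.rdropWhile p := by
  have hd : (List.dropWhile p t.reverse).isEmpty = false := by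
    rw [List.isEmpty_eq_false_iff]
    intro hnil
    exact h (by simp [List.rdropWhile, hnil])
  have hrev : (c :: t).reverse = t.reverse ++ [c] := by simp
  rw [List.rdropWhile, hrev, List.dropWhile_append, hd]
  simp [List.rdropWhile]

lemma pv_rd_singleton_of_nil (p : Char → Bool) (c : Char) (t : List Char)
    (h : t.rdropWhile p = []) (hc : ¬ p c = true) : (c :: t).rdropWhile p = [c] := by
  have hd : (List.dropWhile p t.reverse).isEmpty = true := by
    rw [List.isEmpty_iff]
    have := congrArg List.reverse h
    simpa [List.rdropWhile] using this
  have hrev : (c :: t).reverse = t.reverse ++ [c] := by simp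
  rw [List.rdropWhile, hrev, List.dropWhile_append, hd]
  simp [List.dropWhile, hc]

-- the last kept index is one before the length after rstrip
lemma pvKeep_getLast? (s : List Char) (k : Int) (h : pvKeep s k ≠ []) :
    (pvKeep s k).getLast? = some (k + ((s.rdropWhile pvPunctB.contains).length : Int) - 1) := by
  induction s generalizing k with
  | nil => exact absurd (pvKeep_nil k) h
  | cons c t ih =>
    by_cases ht : pvKeep t (k + 1) = []
    · have hall : ∀ x ∈ t, x ∈ pvPunctB := (pvKeep_eq_nil_iff t (k + 1)).mp ht
      have hrdt : t.rdropWhile pvPunctB.contains = [] :=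
        List.rdropWhile_eq_nil_iff.mpr (by intro x hx; simpa using hall x hx)
      by_cases hc : c ∈ pvPunctB
      · exact absurd (by rw [pvKeep_cons, if_pos hc, ht]) h
      · have hc' : ¬ pvPunctB.contains c = true := by simpa using hc
        rw [pvKeep_cons, if_neg hc, ht, pv_rd_singleton_of_nil _ c t hrdt hc']
        simp
    · have hrdt : t.rdropWhile pvPunctB.contains ≠ [] := by
        intro hnil
        exact ht ((pvKeep_eq_nil_iff t (k + 1)).mpr
          (by intro x hx; simpa using List.rdropWhile_eq_nil_iff.mp hnil x hx))
      have hrd : (c :: t).rdropWhile pvPunctB.contains = c :: t.rdropWhile pvPunctB.contains :=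
        pv_rd_cons_of_ne_nil _ c t hrdt
      have htail : (pvKeep (c :: t) k).getLast? = (pvKeep t (k + 1)).getLast? := by
        by_cases hc : c ∈ pvPunctB
        · rw [pvKeep_cons, if_pos hc]
        · rw [pvKeep_cons, if_neg hc]
          obtain ⟨y, l, hyl⟩ := List.exists_cons_of_ne_nil ht
          rw [hyl, List.getLast?_cons_cons]
      rw [htail, ih (k + 1) ht, hrd, List.length_cons]
      congr 1
      push_cast; ring

-- ===== VERDICT (by name: the statement is the Claim_ definition above) =====
theorem ukloni_interpunkciju_spec : Claim_equal_ukloni_interpunkciju := by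
  intro re_ _
  show ukloni_interpunkciju re_ = ukloni_interpunkciju_alt re_
  have hleft : pvLeftLoop re_.toList 0 = (re_.toList.takeWhile pvPunct.contains).length := by
    simpa using pvLeftLoop_eq re_.toList 0 (Nat.zero_le _)
  have hright : pvRightLoop re_.toList ((re_.toList.length : Int) - 1)
      = ((re_.toList.rdropWhile pvPunct.contains).length : Int) - 1 := by
    rw [pvRightLoop_eq re_.toList re_.toList.length le_rfl, List.take_length]
  simp only [ukloni_interpunkciju, ukloni_interpunkciju_alt]
  split
  · -- keep = []: every character is punctuation, A slices an empty range
    rename_i hK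
    have hall : ∀ x ∈ re_.toList, pvPunct.contains x = true := by
      intro x hx
      simpa [pvPunctB_eq] using (pvKeep_eq_nil_iff re_.toList 0).mp hK x hx
    have hrdnil : re_.toList.rdropWhile pvPunct.contains = [] :=
      List.rdropWhile_eq_nil_iff.mpr hall
    rw [hleft, hright, hrdnil, List.takeWhile_eq_self_iff.mpr hall]
    rw [PySem.List.slice_toNat _ (by positivity) (by simp)]
    simp
  · -- keep = i :: rest: i is the strip start, getLast + 1 the strip end
    rename_i i rest hK
    have hne : pvKeep re_.toList 0 ≠ [] := by rw [hK]; simp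
    have hhead : i = ((re_.toList.takeWhile pvPunct.contains).length : Int) := by
      have := pvKeep_headI re_.toList 0 hne
      rw [hK, List.headI_cons] at this
      simpa [pvPunctB_eq] using this
    have hlast : (i :: rest).getLast (by simp)
        = ((re_.toList.rdropWhile pvPunct.contains).length : Int) - 1 := by
      have h2 := pvKeep_getLast? re_.toList 0 hne
      rw [hK, List.getLast?_eq_some_getLast (by simp), Option.some_inj] at h2
      simpa [pvPunctB_eq] using h2
    rw [hleft, hright, hlast, hhead]
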